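-- pv_equiv track=rewrite | github.com/Danchuong/scriba | scriba/tex/parser/escape.py | parse_command_args
-- ===== SOURCE A (Python) =====
-- def extract_brace_content(text: str, start_pos: int = 0) -> tuple[str, int]:
--     """Extract content between balanced braces starting at ``start_pos``.
--
--     Returns ``(content, position_after_closing_brace)`` or ``("", start_pos)``
--     if no opening brace is at ``start_pos``. On unbalanced braces returns
--     everything after the opening brace and ``len(text)``.
--     """
--     if start_pos >= len(text) or text[start_pos] != "{":
--         return "", start_pos
--
--     depth = 0
--     content_start = start_pos + 1
--     pos = start_pos
--     while pos < len(text):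
--         if text[pos] == "{":
--             depth += 1
--         elif text[pos] == "}":
--             depth -= 1
--             if depth == 0:
--                 return text[content_start:pos], pos + 1
--         pos += 1
--     return text[content_start:], len(text)
--
-- def parse_command_args(text: str, command: str) -> tuple[list[str], int]:
--     """Parse a backslash command at position 0 with N consecutive ``{...}``.
--
--     Returns ``(args, end_position)``. ``end_position`` is the offset just
--     past the last consumed brace, or 0 if the command did not match.
--     """
--     import re
--
--     pattern = r"\\" + re.escape(command)
--     match = re.match(pattern, text)
--     if not match:
--         return [], 0
--     pos = match.end()
--     args: list[str] = []
--     while pos < len(text) and text[pos] == "{":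
--         content, new_pos = extract_brace_content(text, pos)
--         args.append(content)
--         pos = new_pos
--     return args, pos
-- ===== SOURCE B (Python) =====
-- def parse_command_args(text, command):
--     prefix = "\\" + command
--     if not text.startswith(prefix):
--         return [], 0
--     pos = len(prefix)
--     n = len(text)
--     args = []
--     if pos >= n or text[pos] != "{":
--         return args, pos
--     depth = 0
--     start = pos + 1
--     i = pos
--     while i < n:
--         c = text[i]
--         if c == "{":
--             if depth == 0:
--                 start = i + 1
--             depth += 1
--         elif c == "}":
--             depth -= 1
--             if depth == 0:
--                 args.append(text[start:i])
--                 if not (i + 1 < n and text[i + 1] == "{"):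
--                     return args, i + 1
--         i += 1
--     args.append(text[start:])
--     return args, n
-- ===== Notes on version B (the rewrite author's own statement) =====
-- stated objective: simpler
-- what changed: Replaced the per-argument helper extract_brace_content plus outer while-loop by a single flat scan that maintains a brace depth and the current argument's start index, emitting an argument each time depth returns to 0 and stopping unless the next character opens a new brace; the regex prefix match becomes a plain str.startswith.
import Mathlib
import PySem

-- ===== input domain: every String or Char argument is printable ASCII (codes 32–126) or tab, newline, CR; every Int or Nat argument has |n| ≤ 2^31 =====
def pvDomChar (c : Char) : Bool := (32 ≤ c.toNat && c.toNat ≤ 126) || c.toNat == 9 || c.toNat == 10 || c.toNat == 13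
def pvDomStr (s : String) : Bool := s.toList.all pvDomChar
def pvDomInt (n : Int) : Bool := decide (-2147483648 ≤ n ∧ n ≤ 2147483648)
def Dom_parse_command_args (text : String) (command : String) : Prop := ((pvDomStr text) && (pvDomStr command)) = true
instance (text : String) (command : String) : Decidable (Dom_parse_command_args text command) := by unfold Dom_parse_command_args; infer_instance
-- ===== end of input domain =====

-- B replaces the helper-per-argument structure by one flat depth-counting scan (objective: simpler).
-- Loops are ported with a fuel parameter only as a totality guard: each loop advances its
-- position by one per step, so fuel t.length - pos (resp. t.length + 1 for A's outer loop,
-- which advances by at least one) never runs out before the Python loop condition fails.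

-- ===== PORT A =====
-- while-loop of extract_brace_content: depth counting from `pos`, content starts at `contentStart`;
-- fuel = t.length - pos at every step, so fuel 0 coincides with the pos ≥ len(text) exit
def pvExtractLoop (t : List Char) (contentStart : Nat) (depth : Int) (pos : Nat) :
    Nat → String × Nat
  | 0 => (String.ofList (t.drop contentStart), t.length)
  | fuel + 1 =>
    if pos < t.length then
      if t[pos]? = some '{' then pvExtractLoop t contentStart (depth + 1) (pos + 1) fuel
      else if t[pos]? = some '}' then
        if depth - 1 = 0 then
          -- text[content_start:pos]  (both indices in range, contentStart ≤ pos here)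
          (String.ofList ((t.drop contentStart).take (pos - contentStart)), pos + 1)
        else pvExtractLoop t contentStart (depth - 1) (pos + 1) fuel
      else pvExtractLoop t contentStart depth (pos + 1) fuel
    else (String.ofList (t.drop contentStart), t.length)

def pvExtract (t : List Char) (startPos : Nat) : String × Nat :=
  if t.length ≤ startPos ∨ ¬ (t[startPos]? = some '{') then ("", startPos)
  else pvExtractLoop t (startPos + 1) 0 startPos (t.length - startPos)

-- outer while-loop of parse_command_args; each iteration moves pos forward, so fuel
-- t.length + 1 outlasts the loop
def pvArgsLoop (t : List Char) (args : List String) (pos : Nat) :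
    Nat → List String × Nat
  | 0 => (args, pos)
  | fuel + 1 =>
    if pos < t.length ∧ t[pos]? = some '{' then
      pvArgsLoop t (args ++ [(pvExtract t pos).1]) (pvExtract t pos).2 fuel
    else (args, pos)

-- re.match(r"\\" + re.escape(command), text): an escaped pattern is a literal, so the
-- match succeeds iff text starts with "\" + command, and match.end() is that prefix's length
def parse_command_args (text : String) (command : String) : List String × Int :=
  let t := text.toList
  let pat := '\\' :: command.toList
  if PySem.Chars.startswith t pat then
    let r := pvArgsLoop t [] pat.length (t.length + 1)
    (r.1, (r.2 : Int))
  else ([], 0)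

-- ===== PORT B =====
-- flat scan: depth counter + current-argument start index; one step per character, so
-- fuel = t.length - i coincides with the i ≥ n exit
def pvAltLoop (t : List Char) (args : List String) (start : Nat) (depth : Int) (i : Nat) :
    Nat → List String × Nat
  | 0 => (args ++ [String.ofList (t.drop start)], t.length)
  | fuel + 1 =>
    if i < t.length then
      if t[i]? = some '{' then
        pvAltLoop t args (if depth = 0 then i + 1 else start) (depth + 1) (i + 1) fuel
      else if t[i]? = some '}' then
        if depth - 1 = 0 then
          if i + 1 < t.length ∧ t[i + 1]? = some '{' then
            pvAltLoop t (args ++ [String.ofList ((t.drop start).take (i - start))]) start 0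
              (i + 1) fuel
          else (args ++ [String.ofList ((t.drop start).take (i - start))], i + 1)
        else pvAltLoop t args start (depth - 1) (i + 1) fuel
      else pvAltLoop t args start depth (i + 1) fuel
    else (args ++ [String.ofList (t.drop start)], t.length)

def parse_command_args_alt (text : String) (command : String) : List String × Int :=
  let t := text.toList
  let pat := '\\' :: command.toList
  if PySem.Chars.startswith t pat then
    let pos := pat.length
    if pos < t.length ∧ t[pos]? = some '{' then
      let r := pvAltLoop t [] (pos + 1) 0 pos (t.length - pos)
      (r.1, (r.2 : Int))
    else ([], (pos : Int))
  else ([], 0)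

-- ===== PRECONDITION & SPEC =====
def Spec_parse_command_args (text : String) (command : String) (out : List String × Int) : Prop := out = parse_command_args_alt text command
instance (text : String) (command : String) (out : List String × Int) : Decidable (Spec_parse_command_args text command out) := by unfold Spec_parse_command_args; infer_instance

-- ===== CLAIM (what is proved, stated in full; the proofs are below) =====
def Claim_equal_parse_command_args : Prop := ∀ (text : String) (command : String), Dom_parse_command_args text command → Spec_parse_command_args text command (parse_command_args text command)

-- ===== LEMMAS AND PROOFS =====

-- while A's extract loop is mid-argument (depth ≥ 1), resuming A's outer loop after it
-- equals B's flat scan from the same state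
lemma pv_sync (t : List Char) :
    ∀ k i cs args (d : Int) (af : Nat), t.length - i ≤ k → 1 ≤ d → i ≤ t.length →
      t.length - i < af →
      pvArgsLoop t (args ++ [(pvExtractLoop t cs d i (t.length - i)).1])
          (pvExtractLoop t cs d i (t.length - i)).2 af
        = pvAltLoop t args cs d i (t.length - i) := by
  intro k
  induction k with
  | zero =>
      intro i cs args d af hk hd hil haf
      have hi : i = t.length := by omega
      subst hi
      obtain ⟨af, rfl⟩ : ∃ m, af = m + 1 := ⟨af - 1, by omega⟩
      simp [pvExtractLoop, pvAltLoop, pvArgsLoop, Nat.sub_self]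
  | succ k ih =>
      intro i cs args d af hk hd hil haf
      by_cases hi : i < t.length
      · have hfe : t.length - i = (t.length - (i + 1)) + 1 := by omega
        rw [hfe, pvExtractLoop, pvAltLoop]
        simp only [hi, if_pos]
        by_cases h1 : t[i]? = some '{'
        · have hdz : ¬ d = 0 := by omega
          simp only [h1, if_pos, hdz, if_false]
          have := ih (i + 1) cs args (d + 1) af (by omega) (by omega) (by omega) (by omega)
          simpa using this
        · simp only [h1, if_false]
          by_cases h2 : t[i]? = some '}'
          · simp only [h2, if_pos]
            by_cases h3 : d - 1 = 0
            · simp only [h3, if_pos]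
              obtain ⟨af, rfl⟩ : ∃ m, af = m + 1 := ⟨af - 1, by omega⟩
              rw [pvArgsLoop]
              by_cases h4 : i + 1 < t.length ∧ t[i + 1]? = some '{'
              · simp only [h4, if_pos]
                have hx : pvExtract t (i + 1)
                    = pvExtractLoop t (i + 1 + 1) 0 (i + 1) (t.length - (i + 1)) := by
                  rw [pvExtract]
                  have : ¬ (t.length ≤ i + 1 ∨ ¬ (t[i + 1]? = some '{')) := by
                    push_neg; exact ⟨by omega, h4.2⟩
                  rw [if_neg this]
                have hfe2 : t.length - (i + 1) = (t.length - (i + 1 + 1)) + 1 := by omega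
                rw [hx, hfe2, pvExtractLoop]
                simp only [h4.1, if_pos, h4.2]
                conv_rhs => rw [pvAltLoop]
                simp only [h4.1, if_pos, h4.2, if_pos rfl, zero_add]
                have := ih (i + 1 + 1) (i + 1 + 1)
                  (args ++ [String.ofList ((t.drop cs).take (i - cs))]) 1 af
                  (by omega) (by omega) (by omega) (by omega)
                simpa using this
              · simp only [h4, if_false, if_neg]
            · simp only [h3, if_false]
              have := ih (i + 1) cs args (d - 1) af (by omega) (by omega) (by omega) (by omega)
              simpa using this
          · simp only [h2, if_false]
            have := ih (i + 1) cs args d af (by omega) (by omega) (by omega) (by omega)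
            simpa using this
      · have hie : i = t.length := by omega
        subst hie
        obtain ⟨af, rfl⟩ : ∃ m, af = m + 1 := ⟨af - 1, by omega⟩
        simp [pvExtractLoop, pvAltLoop, pvArgsLoop, Nat.sub_self]

-- ===== VERDICT (by name: the statement is the Claim_ definition above) =====
theorem parse_command_args_spec : Claim_equal_parse_command_args := by
  intro text command _
  unfold Spec_parse_command_args parse_command_args parse_command_args_alt
  set t := text.toList with ht
  set pat := '\\' :: command.toList with hpat
  by_cases hs : PySem.Chars.startswith t pat
  · simp only [hs, if_pos]
    set pos := pat.length with hpos
    by_cases hc : pos < t.length ∧ t[pos]? = some '{'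
    · rw [if_pos hc, pvArgsLoop, if_pos hc]
      have hx : pvExtract t pos = pvExtractLoop t (pos + 1) 0 pos (t.length - pos) := by
        rw [pvExtract]
        have : ¬ (t.length ≤ pos ∨ ¬ (t[pos]? = some '{')) := by
          push_neg; exact ⟨by omega, hc.2⟩
        rw [if_neg this]
      have hfe : t.length - pos = (t.length - (pos + 1)) + 1 := by omega
      rw [hx, hfe, pvExtractLoop]
      simp only [hc.1, if_pos, hc.2]
      conv_rhs => rw [pvAltLoop]
      simp only [hc.1, if_pos, hc.2, if_pos rfl]
      have := pv_sync t (t.length - (pos + 1)) (pos + 1) (pos + 1) [] 1 t.length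
        (le_refl _) (le_refl _) (by omega) (by omega)
      simp only [zero_add]
      rw [this]
    · rw [if_neg hc, pvArgsLoop, if_neg hc]
  · simp [hs]
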